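-- pv_equiv track=rewrite | github.com/webb-c/Problem-solving | 백준/Silver/12437. 새로운 달력 （Small）/새로운 달력 （Small）.py | solve
-- ===== SOURCE A (Python) =====
-- import math
--
-- def solve(totalMonth, dayPerMonth, dayPerWeek):
--     basic = math.ceil(dayPerMonth/dayPerWeek)*totalMonth
--     additional = 0
--     remind = dayPerMonth % dayPerWeek
--     space = dayPerWeek - remind
--     for m in range(totalMonth-1):
--         if space != 0 and remind > space:
--             additional += 1
--             space = dayPerWeek - (remind - space)
--         elif space == 0:
--             space = dayPerWeek - remind
--         else:
--             space = space - remind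
--     row = basic + additional
--     return row
-- ===== SOURCE B (Python) =====
-- import math
--
-- def solve(totalMonth, dayPerMonth, dayPerWeek):
--     # O(1): rows = ceil(dayPerMonth/dayPerWeek) per month, plus one extra row for
--     # every month whose cumulative leftover wraps past a week boundary; that count
--     # is floor(totalMonth*r/w) minus the months where the leftover lands exactly
--     # on a boundary, which happen with period w/gcd(r, w).
--     basic = -(-dayPerMonth // dayPerWeek) * totalMonth
--     r = dayPerMonth % dayPerWeek
--     if r == 0 or totalMonth <= 0:
--         return basic
--     period = dayPerWeek // math.gcd(r, dayPerWeek)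
--     return basic + totalMonth * r // dayPerWeek - totalMonth // period
-- ===== Notes on version B (the rewrite author's own statement) =====
-- stated objective: faster
-- what changed: Replaced the O(totalMonth) month-by-month wrap simulation by an O(1) closed form: extra rows = floor(totalMonth*r/w) - floor(totalMonth/(w/gcd(r,w))); Pre_ admits only dayPerWeek > 0, excluding dayPerWeek = 0 where A raises ZeroDivisionError and negative dayPerWeek (a nonsensical week length) where A's values are accidents of Python's negative-divisor modulo that B does not reproduce.
-- outside the precondition, e.g. on solve(3, 5, -7): A returns 2, B returns 1; on solve(5, -3, -4): A returns 5, B returns 10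
import Mathlib
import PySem

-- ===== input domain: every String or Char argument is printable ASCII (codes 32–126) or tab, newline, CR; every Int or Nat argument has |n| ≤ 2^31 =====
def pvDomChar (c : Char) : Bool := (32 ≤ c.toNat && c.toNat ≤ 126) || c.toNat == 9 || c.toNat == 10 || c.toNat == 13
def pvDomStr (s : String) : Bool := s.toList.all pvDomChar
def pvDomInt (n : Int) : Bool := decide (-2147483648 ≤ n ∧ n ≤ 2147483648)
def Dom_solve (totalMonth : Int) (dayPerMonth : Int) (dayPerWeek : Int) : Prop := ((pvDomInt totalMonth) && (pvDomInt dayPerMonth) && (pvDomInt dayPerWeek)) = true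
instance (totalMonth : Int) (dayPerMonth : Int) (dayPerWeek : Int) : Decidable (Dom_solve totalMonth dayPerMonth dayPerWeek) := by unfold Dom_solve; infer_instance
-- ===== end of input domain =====

-- B replaces A's O(totalMonth) per-month wrap simulation by an O(1) gcd-based closed form.

-- ===== PORT A =====
-- one iteration of A's for-loop body on the state (additional, space)
def stepA (remind dayPerWeek : Int) (st : Int × Int) : Int × Int :=
  if st.2 ≠ 0 ∧ remind > st.2 then (st.1 + 1, dayPerWeek - (remind - st.2))
  else if st.2 = 0 then (st.1, dayPerWeek - remind)
  else (st.1, st.2 - remind)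

def solve (totalMonth : Int) (dayPerMonth : Int) (dayPerWeek : Int) : Int :=
  -- math.ceil(dayPerMonth/dayPerWeek): ported as integer ceiling division -((-a)//b),
  -- exact on Dom (|arguments| ≤ 2^31, so the float quotient's ceiling is the exact one)
  let basic := (-(PySem.Int.floordiv (-dayPerMonth) dayPerWeek)) * totalMonth
  let remind := PySem.Int.mod dayPerMonth dayPerWeek
  let st := (PySem.List.pyRange 0 (totalMonth - 1) 1).foldl
      (fun st _m => stepA remind dayPerWeek st) (0, dayPerWeek - remind)
  basic + st.1

-- ===== PORT B =====
def solve_alt (totalMonth : Int) (dayPerMonth : Int) (dayPerWeek : Int) : Int :=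
  let basic := (-(PySem.Int.floordiv (-dayPerMonth) dayPerWeek)) * totalMonth
  let r := PySem.Int.mod dayPerMonth dayPerWeek
  if r = 0 ∨ totalMonth ≤ 0 then basic
  else
    let period := PySem.Int.floordiv dayPerWeek ((Int.gcd r dayPerWeek : Nat) : Int)
    basic + PySem.Int.floordiv (totalMonth * r) dayPerWeek
          - PySem.Int.floordiv totalMonth period

-- ===== PRECONDITION & SPEC =====
-- Pre_ admits only dayPerWeek > 0: A raises ZeroDivisionError on dayPerWeek = 0, and a
-- negative dayPerWeek is a nonsensical week length on which A's values are accidents of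
-- Python's negative-divisor modulo that B does not reproduce.
def Pre_solve (totalMonth : Int) (dayPerMonth : Int) (dayPerWeek : Int) : Prop := dayPerWeek > 0
instance (totalMonth : Int) (dayPerMonth : Int) (dayPerWeek : Int) : Decidable (Pre_solve totalMonth dayPerMonth dayPerWeek) := by unfold Pre_solve; infer_instance
def pvWitness_solve : Int × Int × Int := (3, 5, 7)

def Spec_solve (totalMonth : Int) (dayPerMonth : Int) (dayPerWeek : Int) (out : Int) : Prop := out = solve_alt totalMonth dayPerMonth dayPerWeek
instance (totalMonth : Int) (dayPerMonth : Int) (dayPerWeek : Int) (out : Int) : Decidable (Spec_solve totalMonth dayPerMonth dayPerWeek out) := by unfold Spec_solve; infer_instance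

-- ===== CLAIM =====
def Claim_equal_solve : Prop := ∀ (totalMonth : Int) (dayPerMonth : Int) (dayPerWeek : Int), Dom_solve totalMonth dayPerMonth dayPerWeek → Pre_solve totalMonth dayPerMonth dayPerWeek → Spec_solve totalMonth dayPerMonth dayPerWeek (solve totalMonth dayPerMonth dayPerWeek)

-- ===== LEMMAS AND PROOFS =====

-- folding a function that ignores the list elements is iteration
theorem foldl_const_iterate {α β : Type} (f : α → α) (l : List β) (init : α) :
    l.foldl (fun s _ => f s) init = f^[l.length] init := by
  induction l generalizing init with
  | nil => rfl
  | cons x xs ih => simp [List.foldl, ih, Function.iterate_succ_apply]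

-- w > 0, remainder 0: the state is a fixed point
theorem iter_pos_zero (w : Int) (hw : 0 < w) (n : Nat) :
    (stepA 0 w)^[n] (0, w) = (0, w) := by
  apply Function.iterate_fixed
  simp [stepA]
  omega

-- count of exact multiples met so far: #{i ∈ [2, n+1] : w ∣ i·r}
def cntM (r w : Int) : Nat → Nat
  | 0 => 0
  | n+1 => cntM r w n + (if w ∣ ((n : Int) + 2) * r then 1 else 0)

-- a value in (0, w] decomposing q*w + c is w exactly when w divides the total
theorem dvd_iff_rem_eq (w c q x : Int) (hw : 0 < w) (hd : x = q * w + c)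
    (h0 : 0 < c) (h1 : c ≤ w) : (w ∣ x) ↔ c = w := by
  constructor
  · rintro ⟨t, ht⟩
    have hc'eq : c = (t - q) * w := by rw [ht] at hd; linarith
    rcases lt_trichotomy (t - q) 1 with h | h | h
    · exfalso
      have h' : t - q ≤ 0 := by omega
      have := mul_le_mul_of_nonneg_right h' hw.le
      rw [zero_mul] at this
      omega
    · rw [h, one_mul] at hc'eq; omega
    · exfalso
      have h' : (2 : Int) ≤ t - q := by omega
      have := mul_le_mul_of_nonneg_right h' hw.le
      omega
  · intro hcw
    exact ⟨q + 1, by linarith⟩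

-- w > 0, 0 < r < w: full loop invariant
theorem iter_pos (w r : Int) (hw : 0 < w) (hr : 0 < r) (hrw : r < w) :
    ∀ n : Nat, ∃ q c : Int,
      ((n : Int) + 1) * r = q * w + c ∧ 0 < c ∧ c ≤ w ∧
      (stepA r w)^[n] (0, w - r)
        = (q + (if c = w then 1 else 0) - (cntM r w n : Int), w - c) := by
  intro n
  induction n with
  | zero =>
    refine ⟨0, r, by ring, hr, le_of_lt hrw, ?_⟩
    simp [cntM, if_neg (ne_of_lt hrw)]
  | succ k ih =>
    obtain ⟨q, c, hdec, hc0, hcw, hst⟩ := ih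
    rw [Function.iterate_succ_apply', hst]
    by_cases hceq : c = w
    · -- space = 0: reset, no increment
      have hdec' : ((k : Int) + 2) * r = (q + 1) * w + r := by
        nlinarith [hdec]
      have hnd : ¬ (w ∣ ((k : Int) + 2) * r) := by
        rw [dvd_iff_rem_eq w r (q + 1) _ hw hdec' hr (le_of_lt hrw)]; omega
      refine ⟨q + 1, r, hdec', hr, le_of_lt hrw, ?_⟩
      simp only [stepA]
      rw [if_neg (by omega : ¬ (w - c ≠ 0 ∧ r > w - c)), if_pos (by omega : w - c = 0)]
      simp only [cntM, if_neg hnd, if_pos hceq, if_neg (ne_of_lt hrw), Prod.mk.injEq]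
      constructor
      · push_cast; ring
      · trivial
    · by_cases hbig : c + r > w
      · -- wrap: increment
        have hc' : ((k : Int) + 2) * r = (q + 1) * w + (c + r - w) := by
          nlinarith [hdec]
        have h0' : 0 < c + r - w := by omega
        have h1' : c + r - w < w := by omega
        have hnd : ¬ (w ∣ ((k : Int) + 2) * r) := by
          rw [dvd_iff_rem_eq w (c + r - w) (q + 1) _ hw hc' h0' (le_of_lt h1')]; omega
        refine ⟨q + 1, c + r - w, hc', h0', le_of_lt h1', ?_⟩
        simp only [stepA]
        rw [if_pos (by constructor <;> omega : (w - c ≠ 0 ∧ r > w - c))]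
        simp only [cntM, if_neg hnd, if_neg hceq, if_neg (ne_of_lt h1'), Prod.mk.injEq]
        constructor
        · push_cast; ring
        · ring
      · -- no wrap
        have hc' : ((k : Int) + 2) * r = q * w + (c + r) := by
          nlinarith [hdec]
        have h0' : 0 < c + r := by omega
        have h1' : c + r ≤ w := by omega
        have hiff := dvd_iff_rem_eq w (c + r) q _ hw hc' h0' h1'
        refine ⟨q, c + r, hc', h0', h1', ?_⟩
        simp only [stepA]
        rw [if_neg (by omega : ¬ (w - c ≠ 0 ∧ r > w - c)), if_neg (by omega : ¬ w - c = 0)]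
        simp only [cntM, hiff, if_neg hceq, Prod.mk.injEq]
        constructor
        · by_cases he : c + r = w <;> simp [he]
        · ring

-- pure-Nat core: W divides i*R exactly when W/gcd divides i
theorem nat_dvd_iff_div_gcd (W R i : Nat) (hR : 0 < R) :
    (W ∣ i * R) ↔ (W / Nat.gcd R W ∣ i) := by
  set g := Nat.gcd R W with hg
  have hgpos : 0 < g := by rw [hg]; exact Nat.gcd_pos_of_pos_left W hR
  have hgR : g ∣ R := by rw [hg]; exact Nat.gcd_dvd_left R W
  have hgW : g ∣ W := by rw [hg]; exact Nat.gcd_dvd_right R W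
  have hcop : Nat.Coprime (W / g) (R / g) := by
    rw [hg]; exact (Nat.coprime_div_gcd_div_gcd (by rw [← hg]; exact hgpos)).symm
  have hW2 : g * (W / g) = W := Nat.mul_div_cancel' hgW
  have hR2 : g * (R / g) = R := Nat.mul_div_cancel' hgR
  constructor
  · intro h
    have h2 : g * (W / g) ∣ g * (i * (R / g)) := by
      rw [hW2, show g * (i * (R / g)) = i * (g * (R / g)) from by ring, hR2]; exact h
    exact hcop.dvd_of_dvd_mul_right ((Nat.mul_dvd_mul_iff_left hgpos).mp h2)
  · intro h
    have h2 := Nat.mul_dvd_mul_left g (h.mul_right (R / g))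
    rw [hW2, show g * (i * (R / g)) = i * (g * (R / g)) from by ring, hR2] at h2
    exact h2

-- w ∣ i·r ↔ (w / gcd r w) ∣ i, for 0 < r < w (stated over Nat indices)
theorem dvd_iff_dvd_div_gcd (w r : Int) (hw : 0 < w) (hr : 0 < r) (hrw : r < w) (i : Nat) :
    (w ∣ (i : Int) * r) ↔ ((w.toNat / Nat.gcd r.toNat w.toNat) ∣ i) := by
  have hrn : ((r.toNat : Int)) = r := Int.toNat_of_nonneg (le_of_lt hr)
  have hwn : ((w.toNat : Int)) = w := Int.toNat_of_nonneg (le_of_lt hw)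
  have step1 : (w ∣ (i : Int) * r) ↔ (w.toNat ∣ i * r.toNat) := by
    rw [← hrn, ← hwn]
    constructor
    · intro h; exact_mod_cast h
    · intro h; exact_mod_cast h
  rw [step1, nat_dvd_iff_div_gcd w.toNat r.toNat i (by omega)]

-- the running multiple-count equals a floor division
theorem cntM_eq_div (w r : Int) (hw : 0 < w) (hr : 0 < r) (hrw : r < w) (n : Nat) :
    cntM r w n = (n + 1) / (w.toNat / Nat.gcd r.toNat w.toNat) := by
  set d := w.toNat / Nat.gcd r.toNat w.toNat with hd
  have hd0 : 0 < d := by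
    apply Nat.div_pos (Nat.le_of_dvd (by omega) (Nat.gcd_dvd_right r.toNat w.toNat))
    exact Nat.gcd_pos_of_pos_left _ (by omega)
  have hd1 : d ≠ 1 := by
    intro h1
    have := (dvd_iff_dvd_div_gcd w r hw hr hrw 1).mpr (h1 ▸ dvd_refl d)
    simp at this
    exact absurd (Int.le_of_dvd hr this) (by omega)
  induction n with
  | zero =>
    show (0 : Nat) = 1 / d
    rw [Nat.div_eq_of_lt (by omega)]
  | succ k ih =>
    have hiff : (w ∣ ((k : Int) + 2) * r) ↔ d ∣ (k + 2) := by
      have h := dvd_iff_dvd_div_gcd w r hw hr hrw (k + 2)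
      rwa [show (((k + 2 : Nat)) : Int) = (k : Int) + 2 by push_cast; ring] at h
    show cntM r w k + (if w ∣ ((k : Int) + 2) * r then 1 else 0) = (k + 1 + 1) / d
    rw [ih]
    conv_rhs => rw [Nat.succ_div]
    simp only [hiff]

-- cast of a Nat division
theorem natCast_ediv (a b : Nat) : ((a / b : Nat) : Int) = (a : Int) / (b : Int) := by
  push_cast; ring

-- main equivalence
theorem solve_eq (totalMonth dayPerMonth dayPerWeek : Int) (hW : dayPerWeek > 0) :
    solve totalMonth dayPerMonth dayPerWeek = solve_alt totalMonth dayPerMonth dayPerWeek := by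
  unfold solve solve_alt
  dsimp only
  set w := dayPerWeek
  set r := PySem.Int.mod dayPerMonth w with hr
  rw [foldl_const_iterate, PySem.List.length_pyRange_one]
  set N := (totalMonth - 1 - 0).toNat with hN
  have h0 : 0 ≤ r := PySem.Int.mod_nonneg dayPerMonth hW
  have h1 : r < w := PySem.Int.mod_lt dayPerMonth hW
  by_cases hr0 : r = 0
  · rw [if_pos (Or.inl hr0), hr0, show w - 0 = w from by ring, iter_pos_zero w hW N]
    ring
  · by_cases htm : totalMonth ≤ 0
    · rw [if_pos (Or.inr htm)]
      have hN0 : N = 0 := by omega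
      rw [hN0]
      simp
    · rw [if_neg (by push_neg; exact ⟨hr0, by omega⟩)]
      have hrpos : 0 < r := by omega
      obtain ⟨q, c, hdec, hc0, hcw, hst⟩ := iter_pos w r hW hrpos h1 N
      rw [hst]
      have hT : ((N : Int)) + 1 = totalMonth := by omega
      have hgpos : (0 : Int) < ((Int.gcd r w : Nat) : Int) := by
        have hne : Int.gcd r w ≠ 0 := by
          simp [Int.gcd_eq_zero_iff]
          omega
        omega
      have hgcd : (Int.gcd r w : Nat) = Nat.gcd r.toNat w.toNat := by
        unfold Int.gcd
        congr 1 <;> omega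
      have hwg : w / ((Int.gcd r w : Nat) : Int) = ((w.toNat / Nat.gcd r.toNat w.toNat : Nat) : Int) := by
        rw [hgcd, natCast_ediv, Int.toNat_of_nonneg hW.le]
      have hdNat : 0 < w.toNat / Nat.gcd r.toNat w.toNat := by
        apply Nat.div_pos (Nat.le_of_dvd (by omega) (Nat.gcd_dvd_right r.toNat w.toNat))
        exact Nat.gcd_pos_of_pos_left _ (by omega)
      have hperiodpos : (0 : Int) < w / ((Int.gcd r w : Nat) : Int) := by
        rw [hwg]; exact_mod_cast hdNat
      rw [PySem.Int.floordiv_eq_ediv_of_pos hW,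
          PySem.Int.floordiv_eq_ediv_of_pos hW,
          PySem.Int.floordiv_eq_ediv_of_pos hgpos,
          PySem.Int.floordiv_eq_ediv_of_pos hperiodpos]
      -- first term: (totalMonth*r)/w = q + [c = w]
      have hfirst : totalMonth * r / w = q + (if c = w then 1 else 0) := by
        rw [← hT]
        by_cases hce : c = w
        · rw [if_pos hce]
          have heq : ((N : Int) + 1) * r = (q + 1) * w := by rw [hdec, hce]; ring
          rw [heq, Int.mul_ediv_cancel _ (by omega)]
        · rw [if_neg hce, hdec, add_comm (q * w) c,
              Int.add_mul_ediv_right c q (by omega : w ≠ 0),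
              Int.ediv_eq_zero_of_lt hc0.le (by omega)]
          omega
      -- second term: totalMonth/period = cntM
      have hsecond : totalMonth / (w / ((Int.gcd r w : Nat) : Int)) = (cntM r w N : Int) := by
        rw [← hT, hwg, cntM_eq_div w r hW hrpos h1 N, natCast_ediv]
        push_cast
        ring_nf
      rw [hfirst, hsecond]
      ring

-- ===== VERDICT =====
theorem solve_spec : Claim_equal_solve := by
  intro tm dpm w _ hpre
  unfold Spec_solve
  exact solve_eq tm dpm w hpre
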